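-- pv_equiv track=rewrite | github.com/rogojagad/tugas-akhir | dependency_parser.py | get_governor_relation
-- ===== SOURCE A (Python) =====
-- def get_governor_relation(tokenized, results):
--     needed_relation = ['amod', 'nsubj', 'dependent']
--     rel = {}
--
--     for token in tokenized:
--         for data in results:
--             if data[0][0] == token and data[1] in needed_relation:
--                 if token in rel:
--                     if data[1] not in rel[token].split(';'):
--                         rel[token] += ';' + data[1]
--                 else:
--                     rel[token] = data[1]
--
--     return rel
-- ===== SOURCE B (Python) =====
-- def get_governor_relation(tokenized, results):
--     needed_relation = ('amod', 'nsubj', 'dependent')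
--
--     # one pass over results: governor token -> ordered list of unique needed relations
--     index = {}
--     for key_list, relation in results:
--         if key_list and relation in needed_relation:
--             key = key_list[0]
--             rels = index.get(key, [])
--             if relation not in rels:
--                 index[key] = rels + [relation]
--
--     rel = {}
--     for token in tokenized:
--         if token not in rel and token in index:
--             rel[token] = ';'.join(index[token])
--
--     return rel
-- ===== Notes on version B (the rewrite author's own statement) =====
-- stated objective: faster
-- what changed: A rescans all results for every token (nested loops, appending to a ';'-joined string with a split-based duplicate check); B makes one pass over results building a dict from governor token to its ordered unique needed relations, then one lookup pass over tokenized, joining each relation list once.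
-- crash fix: When tokenized is nonempty and some result has an empty first component, A raises IndexError on data[0][0]; B skips such results and returns the dict built from the remaining ones. — e.g. on get_governor_relation(["cat"], [([], "amod"), (["cat"], "nsubj")]): A raises IndexError, B returns [("cat", "nsubj")]
import Mathlib
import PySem

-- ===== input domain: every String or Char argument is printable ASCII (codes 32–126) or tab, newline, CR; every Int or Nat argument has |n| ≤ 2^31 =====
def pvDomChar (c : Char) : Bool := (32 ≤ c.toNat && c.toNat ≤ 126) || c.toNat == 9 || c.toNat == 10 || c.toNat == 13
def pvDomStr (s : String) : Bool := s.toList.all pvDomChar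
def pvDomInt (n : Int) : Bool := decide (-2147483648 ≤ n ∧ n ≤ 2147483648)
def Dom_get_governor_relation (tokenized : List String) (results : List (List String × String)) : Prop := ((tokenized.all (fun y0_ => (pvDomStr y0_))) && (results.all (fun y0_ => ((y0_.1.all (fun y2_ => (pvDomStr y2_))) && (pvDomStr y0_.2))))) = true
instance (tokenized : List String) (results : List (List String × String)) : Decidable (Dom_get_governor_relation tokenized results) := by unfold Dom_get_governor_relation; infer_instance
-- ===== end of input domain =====

-- B replaces A's token×results double scan by one indexing pass over results plus one lookup per token
-- (O(T·R) → O(T+R) dictionary passes); return-value equivalence only (neither version mutates its arguments).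

-- ===== PORT A =====
-- A's inner-loop body: 'for data in results: if data[0][0] == token and data[1] in needed_relation: …'.
-- data[0][0] raises IndexError when data[0] == []; Pre_ excludes that, '.getD ""' is a dummy there.
def pvStepA (token : String) (rel : PySem.Dict String String) (data : List String × String) : PySem.Dict String String :=
  if (PySem.List.pyGet? data.1 0).getD "" = token ∧ data.2 ∈ ["amod", "nsubj", "dependent"] then
    if rel.contains token then
      -- 'if data[1] not in rel[token].split(';')' — split? is some since the separator ";" ≠ ""
      if data.2 ∉ (PySem.Str.split? (rel.getD token "") ";").getD [] then
        rel.insert token (rel.getD token "" ++ ";" ++ data.2)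
      else rel
    else rel.insert token data.2
  else rel

def pvInnerA (results : List (List String × String)) (rel : PySem.Dict String String) (token : String) : PySem.Dict String String :=
  results.foldl (pvStepA token) rel

def get_governor_relation (tokenized : List String) (results : List (List String × String)) : List (String × String) :=
  (tokenized.foldl (pvInnerA results) PySem.Dict.empty).items

-- ===== PORT B =====
-- pass 1: 'for key_list, relation in results: if key_list and relation in needed_relation: …'
def pvIndexStep (index : PySem.Dict String (List String)) (r : List String × String) : PySem.Dict String (List String) :=
  match r.1 with
  | [] => index
  | key :: _ =>
    if r.2 ∈ ["amod", "nsubj", "dependent"] then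
      let rels := index.getD key []
      if r.2 ∉ rels then index.insert key (rels ++ [r.2]) else index
    else index

def pvIndexB (results : List (List String × String)) : PySem.Dict String (List String) :=
  results.foldl pvIndexStep PySem.Dict.empty

-- pass 2: 'for token in tokenized: if token not in rel and token in index: rel[token] = ";".join(index[token])'
def pvStepB (index : PySem.Dict String (List String)) (rel : PySem.Dict String String) (token : String) : PySem.Dict String String :=
  if ¬ rel.contains token ∧ index.contains token then
    rel.insert token (PySem.Str.join ";" (index.getD token []))
  else rel

def get_governor_relation_alt (tokenized : List String) (results : List (List String × String)) : List (String × String) :=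
  (tokenized.foldl (pvStepB (pvIndexB results)) PySem.Dict.empty).items

-- ===== PRECONDITION & SPEC =====
-- Pre_ excludes exactly the inputs where A raises IndexError on 'data[0][0]': a nonempty token list
-- together with some result whose first component is the empty list.
def Pre_get_governor_relation (tokenized : List String) (results : List (List String × String)) : Prop :=
  tokenized = [] ∨ ∀ r ∈ results, r.1 ≠ []
instance (tokenized : List String) (results : List (List String × String)) : Decidable (Pre_get_governor_relation tokenized results) := by unfold Pre_get_governor_relation; infer_instance

def pvWitness_get_governor_relation : List String × (List (List String × String)) :=
  (["cat", "dog"], [(["cat", "x"], "amod"), (["cat"], "nsubj"), (["dog"], "punct"), (["cat", "y"], "amod")])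

-- On a nonempty token list with some result whose first component is [], A raises IndexError; B skips that result and returns the dict built from the rest.
def Raises_get_governor_relation (tokenized : List String) (results : List (List String × String)) : Prop :=
  tokenized ≠ [] ∧ ∃ r ∈ results, r.1 = []
instance (tokenized : List String) (results : List (List String × String)) : Decidable (Raises_get_governor_relation tokenized results) := by unfold Raises_get_governor_relation; infer_instance
def pvRaiseWitness_get_governor_relation : List String × (List (List String × String)) :=
  (["cat"], [([], "amod"), (["cat"], "nsubj")])
def pvRaiseWitnessOut_get_governor_relation : List (String × String) := [("cat", "nsubj")]

def Spec_get_governor_relation (tokenized : List String) (results : List (List String × String)) (out : List (String × String)) : Prop := out = get_governor_relation_alt tokenized results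
instance (tokenized : List String) (results : List (List String × String)) (out : List (String × String)) : Decidable (Spec_get_governor_relation tokenized results out) := by unfold Spec_get_governor_relation; infer_instance

-- ===== CLAIM (what is proved, stated in full; the proofs are below) =====
def Claim_equal_get_governor_relation : Prop := ∀ (tokenized : List String) (results : List (List String × String)), Dom_get_governor_relation tokenized results → Pre_get_governor_relation tokenized results → Spec_get_governor_relation tokenized results (get_governor_relation tokenized results)

def Claim_raises_get_governor_relation : Prop := (∀ (tokenized : List String) (results : List (List String × String)), Dom_get_governor_relation tokenized results → Raises_get_governor_relation tokenized results → ¬ Pre_get_governor_relation tokenized results) ∧ (Dom_get_governor_relation (pvRaiseWitness_get_governor_relation.1) (pvRaiseWitness_get_governor_relation.2) ∧ Raises_get_governor_relation (pvRaiseWitness_get_governor_relation.1) (pvRaiseWitness_get_governor_relation.2) ∧ get_governor_relation_alt (pvRaiseWitness_get_governor_relation.1) (pvRaiseWitness_get_governor_relation.2) = pvRaiseWitnessOut_get_governor_relation)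

-- ===== LEMMAS AND PROOFS =====

-- the ordered unique list of needed relations of governor t contributed by rs, starting from acc
def pvCollect : List (List String × String) → String → List String → List String
  | [], _, acc => acc
  | r :: rs, t, acc =>
    match r.1 with
    | [] => pvCollect rs t acc
    | k :: _ =>
      if k = t ∧ r.2 ∈ ["amod", "nsubj", "dependent"] ∧ r.2 ∉ acc
      then pvCollect rs t (acc ++ [r.2]) else pvCollect rs t acc

def pvOk (u : List String) : Prop := u.Nodup ∧ ∀ x ∈ u, x ∈ ["amod", "nsubj", "dependent"]

lemma pvOk_enum (u : List String) (h : pvOk u) :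
    u ∈ ([[], ["amod"], ["nsubj"], ["dependent"],
          ["amod","nsubj"], ["amod","dependent"], ["nsubj","amod"], ["nsubj","dependent"],
          ["dependent","amod"], ["dependent","nsubj"],
          ["amod","nsubj","dependent"], ["amod","dependent","nsubj"],
          ["nsubj","amod","dependent"], ["nsubj","dependent","amod"],
          ["dependent","amod","nsubj"], ["dependent","nsubj","amod"]] : List (List String)) := by
  obtain ⟨hnd, hsub⟩ := h
  have hlen : u.length ≤ 3 := by
    have := (List.Nodup.subperm hnd hsub).length_le
    simpa using this
  rcases u with _ | ⟨a, _ | ⟨b, _ | ⟨c, _ | ⟨d, rest⟩⟩⟩⟩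
  · decide
  · have ha := hsub a (by simp); simp at ha
    rcases ha with rfl | rfl | rfl <;> decide
  · have ha := hsub a (by simp); have hb := hsub b (by simp)
    simp at ha hb hnd
    rcases ha with rfl | rfl | rfl <;> rcases hb with rfl | rfl | rfl <;> simp_all
  · have ha := hsub a (by simp); have hb := hsub b (by simp); have hc := hsub c (by simp)
    simp at ha hb hc hnd
    rcases ha with rfl | rfl | rfl <;> rcases hb with rfl | rfl | rfl <;>
      rcases hc with rfl | rfl | rfl <;> simp_all
  · simp at hlen; omega

lemma pv_split_join (u : List String) (h : pvOk u) (hne : u ≠ []) :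
    (PySem.Str.split? (PySem.Str.join ";" u) ";").getD [] = u := by
  have hmem := pvOk_enum u h
  fin_cases hmem
  · exact absurd rfl hne
  all_goals decide

lemma pv_join_append (u : List String) (x : String) (h : pvOk u) (hne : u ≠ [])
    (hx : x ∈ ["amod", "nsubj", "dependent"]) :
    PySem.Str.join ";" u ++ ";" ++ x = PySem.Str.join ";" (u ++ [x]) := by
  have hmem := pvOk_enum u h
  fin_cases hmem
  · exact absurd rfl hne
  all_goals (fin_cases hx <;> decide)

lemma pv_join_singleton (x : String) (hx : x ∈ ["amod", "nsubj", "dependent"]) :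
    x = PySem.Str.join ";" [x] := by
  fin_cases hx <;> decide

lemma pvCollect_prefix (rs : List (List String × String)) (t : String) :
    ∀ acc, acc <+: pvCollect rs t acc := by
  induction rs with
  | nil => intro acc; exact List.prefix_refl _
  | cons r rs ih =>
    intro acc
    obtain ⟨r1, r2⟩ := r
    cases r1 with
    | nil => exact ih acc
    | cons k tl =>
      simp only [pvCollect]
      split
      · exact List.IsPrefix.trans ⟨[r2], rfl⟩ (ih (acc ++ [r2]))
      · exact ih acc

lemma pvCollect_ok (rs : List (List String × String)) (t : String) :
    ∀ acc, pvOk acc → pvOk (pvCollect rs t acc) := by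
  induction rs with
  | nil => intro acc h; exact h
  | cons r rs ih =>
    intro acc h
    obtain ⟨r1, r2⟩ := r
    cases r1 with
    | nil => exact ih acc h
    | cons k tl =>
      simp only [pvCollect]
      split
      · rename_i hcond
        refine ih _ ⟨?_, ?_⟩
        · simp only [List.nodup_append]
          refine ⟨h.1, List.nodup_singleton _, ?_⟩
          intro a ha b hb
          simp only [List.mem_singleton] at hb
          subst hb
          exact fun heq => hcond.2.2 (heq ▸ ha)
        · intro x hx
          rcases List.mem_append.1 hx with hx | hx
          · exact h.2 x hx
          · simp at hx; subst hx; exact hcond.2.1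
      · exact ih acc h

lemma pvCollect_stable (rs : List (List String × String)) (t : String) :
    ∀ acc, (∀ r ∈ rs, ∀ k tl, r.1 = k :: tl → k = t → r.2 ∈ ["amod", "nsubj", "dependent"] → r.2 ∈ acc) →
    pvCollect rs t acc = acc := by
  induction rs with
  | nil => intro acc _; rfl
  | cons r rs ih =>
    intro acc h
    obtain ⟨r1, r2⟩ := r
    cases r1 with
    | nil => exact ih acc (fun r' hr' => h r' (List.mem_cons_of_mem _ hr'))
    | cons k tl =>
      simp only [pvCollect]
      rw [if_neg]
      · exact ih acc (fun r' hr' => h r' (List.mem_cons_of_mem _ hr'))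
      · rintro ⟨hkt, hmem, hnin⟩
        exact hnin (h (k :: tl, r2) (by simp) k tl rfl hkt hmem)

lemma pvCollect_mem_mono (rs : List (List String × String)) (t : String) :
    ∀ acc x, x ∈ acc → x ∈ pvCollect rs t acc := by
  induction rs with
  | nil => intro acc x hx; exact hx
  | cons r rs ih =>
    intro acc x hx
    obtain ⟨r1, r2⟩ := r
    cases r1 with
    | nil => exact ih acc x hx
    | cons k tl =>
      simp only [pvCollect]
      split
      · exact ih _ x (List.mem_append_left _ hx)
      · exact ih acc x hx

lemma pvCollect_mem_of_match (rs : List (List String × String)) (t : String) :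
    ∀ acc (r : List String × String), r ∈ rs → ∀ k tl, r.1 = k :: tl →
    k = t → r.2 ∈ ["amod", "nsubj", "dependent"] → r.2 ∈ pvCollect rs t acc := by
  induction rs with
  | nil => intro acc r hr; cases hr
  | cons r0 rs ih =>
    intro acc r hr k tl h1 h2 h3
    rcases List.mem_cons.1 hr with rfl | hr2
    · obtain ⟨r1, r2⟩ := r
      simp only at h1
      subst h1
      simp only [pvCollect]
      split
      · exact pvCollect_mem_mono rs t _ r2 (List.mem_append_right _ (by simp))
      · rename_i hcond
        push Not at hcond
        exact pvCollect_mem_mono rs t acc r2 (hcond h2 h3)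
    · obtain ⟨r1, r2⟩ := r0
      cases r1 with
      | nil => exact ih acc r hr2 k tl h1 h2 h3
      | cons k0 tl0 =>
        simp only [pvCollect]
        split
        · exact ih _ r hr2 k tl h1 h2 h3
        · exact ih acc r hr2 k tl h1 h2 h3

lemma pvCollect_absorb (rs : List (List String × String)) (t : String) (acc : List String) :
    pvCollect rs t (pvCollect rs t acc) = pvCollect rs t acc := by
  apply pvCollect_stable
  intro r hr k tl h1 h2 h3
  exact pvCollect_mem_of_match rs t acc r hr k tl h1 h2 h3

-- A's inner loop computes the join of pvCollect
lemma pvInnerA_eq (rs : List (List String × String)) (t : String) :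
    ∀ (rel : PySem.Dict String String) (u : List String),
    (∀ r ∈ rs, r.1 ≠ []) → pvOk u →
    (u = [] → rel.get? t = none) →
    (u ≠ [] → rel.get? t = some (PySem.Str.join ";" u)) →
    rs.foldl (pvStepA t) rel =
      if pvCollect rs t u = u then rel else rel.insert t (PySem.Str.join ";" (pvCollect rs t u)) := by
  induction rs with
  | nil => intro rel u _ _ _ _; simp [pvCollect]
  | cons r rs ih =>
    intro rel u hnil hok hu0 husome
    obtain ⟨r1, r2⟩ := r
    obtain ⟨k, tl, rfl⟩ : ∃ k tl, r1 = k :: tl := by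
      cases hcase : r1 with
      | nil => exact absurd hcase (hnil (r1, r2) (by simp))
      | cons k tl => exact ⟨k, tl, rfl⟩
    have hnil' : ∀ r' ∈ rs, r'.1 ≠ [] := fun r' h' => hnil r' (List.mem_cons_of_mem _ h')
    have hhd : (PySem.List.pyGet? (k :: tl) 0).getD "" = k := by simp [pysem]
    simp only [List.foldl_cons]
    by_cases hc : k = t ∧ r2 ∈ ["amod", "nsubj", "dependent"]
    · obtain ⟨rfl, hmem⟩ := hc
      by_cases hu : u = []
      · subst hu
        have hget := hu0 rfl
        have hcont : rel.contains k = false := by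
          rw [PySem.Dict.contains_eq_isSome_get?, hget]; rfl
        have hstep : pvStepA k rel (k :: tl, r2) = rel.insert k r2 := by
          simp [pvStepA, hcont, hmem]
        rw [hstep]
        have hcol : pvCollect ((k :: tl, r2) :: rs) k [] = pvCollect rs k [r2] := by
          simp [pvCollect, hmem]
        rw [hcol]
        rw [ih (rel.insert k r2) [r2] hnil' ⟨List.nodup_singleton _, by simpa using hmem⟩
          (by simp) (fun _ => by
            rw [PySem.Dict.get?_insert_self]
            exact congrArg some (pv_join_singleton r2 hmem))]
        have hne2 : pvCollect rs k [r2] ≠ [] := by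
          intro h
          have := pvCollect_prefix rs k [r2]
          rw [h] at this
          simp at this
        rw [if_neg hne2]
        split_ifs with h
        · rw [h, ← pv_join_singleton r2 hmem]
        · rw [PySem.Dict.insert_insert_self]
      · have hget := husome hu
        have hcont : rel.contains k = true := by
          rw [PySem.Dict.contains_eq_isSome_get?, hget]; rfl
        have hgetD : rel.getD k "" = PySem.Str.join ";" u := by
          rw [show rel.getD k "" = (rel.get? k).getD "" from rfl, hget]; rfl
        have hsplit : (PySem.Str.split? (rel.getD k "") ";").getD [] = u := by
          rw [hgetD]; exact pv_split_join u hok hu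
        by_cases hru : r2 ∈ u
        · have hstep : pvStepA k rel (k :: tl, r2) = rel := by
            simp [pvStepA, hcont, hgetD, pv_split_join u hok hu, hru, hmem]
          have hcol : pvCollect ((k :: tl, r2) :: rs) k u = pvCollect rs k u := by
            simp [pvCollect, hru]
          rw [hstep, hcol]
          exact ih rel u hnil' hok hu0 husome
        · have hstep : pvStepA k rel (k :: tl, r2) =
              rel.insert k (PySem.Str.join ";" (u ++ [r2])) := by
            simp [pvStepA, hcont, hgetD, pv_split_join u hok hu, hru, hmem,
              pv_join_append u r2 hok hu hmem]
          have hcol : pvCollect ((k :: tl, r2) :: rs) k u = pvCollect rs k (u ++ [r2]) := by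
            simp [pvCollect, hmem, hru]
          rw [hstep, hcol]
          have hok2 : pvOk (u ++ [r2]) := by
            refine ⟨?_, ?_⟩
            · simp only [List.nodup_append]
              refine ⟨hok.1, List.nodup_singleton _, ?_⟩
              intro a ha b hb
              simp only [List.mem_singleton] at hb
              subst hb
              exact fun heq => hru (heq ▸ ha)
            · intro x hx
              rcases List.mem_append.1 hx with hx | hx
              · exact hok.2 x hx
              · simp at hx; subst hx; exact hmem
          rw [ih (rel.insert k (PySem.Str.join ";" (u ++ [r2]))) (u ++ [r2]) hnil' hok2
            (by simp) (fun _ => PySem.Dict.get?_insert_self _ _ _)]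
          have hne2 : pvCollect rs k (u ++ [r2]) ≠ u := by
            intro h
            have hp := pvCollect_prefix rs k (u ++ [r2])
            rw [h] at hp
            have := hp.length_le
            simp at this
          rw [if_neg hne2]
          split_ifs with h
          · rw [h]
          · rw [PySem.Dict.insert_insert_self]
    · have hstep : pvStepA t rel (k :: tl, r2) = rel := by
        simp only [pvStepA, hhd]
        rw [if_neg hc]
      have hcol : pvCollect ((k :: tl, r2) :: rs) t u = pvCollect rs t u := by
        simp only [pvCollect]
        rw [if_neg (by tauto)]
      rw [hstep, hcol]
      exact ih rel u hnil' hok hu0 husome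

-- B's index pass computes pvCollect at every key
lemma pvIndexB_spec (rs : List (List String × String)) :
    ∀ (d : PySem.Dict String (List String)),
    (∀ s : String, pvOk (d.getD s []) ∧ d.get? s ≠ some []) →
    ∀ t : String,
      (rs.foldl pvIndexStep d).getD t [] = pvCollect rs t (d.getD t []) ∧
      ((rs.foldl pvIndexStep d).contains t = true ↔ pvCollect rs t (d.getD t []) ≠ []) := by
  induction rs with
  | nil =>
    intro d hinv t
    simp only [List.foldl_nil, pvCollect]
    refine ⟨by trivial, ?_⟩
    rw [PySem.Dict.contains_eq_isSome_get?]
    cases hc : d.get? t with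
    | none => simp [show d.getD t [] = (d.get? t).getD [] from rfl, hc]
    | some v =>
      have hv : v ≠ [] := fun h => (hinv t).2 (h ▸ hc)
      simp [show d.getD t [] = (d.get? t).getD [] from rfl, hc, hv]
  | cons r rs ih =>
    intro d hinv t
    obtain ⟨r1, r2⟩ := r
    cases r1 with
    | nil => simpa only [List.foldl_cons, pvIndexStep, pvCollect] using ih d hinv t
    | cons k tl =>
      simp only [List.foldl_cons]
      by_cases hmem : r2 ∈ ["amod", "nsubj", "dependent"]
      · by_cases hin : r2 ∈ d.getD k []
        · have hstep : pvIndexStep d (k :: tl, r2) = d := by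
            simp [pvIndexStep, hmem, hin]
          have hcol : pvCollect ((k :: tl, r2) :: rs) t (d.getD t []) =
              pvCollect rs t (d.getD t []) := by
            simp only [pvCollect]
            rw [if_neg]
            rintro ⟨h1, _, h3⟩
            exact h3 (h1 ▸ hin)
          rw [hstep, hcol]
          exact ih d hinv t
        · have hstep : pvIndexStep d (k :: tl, r2) = d.insert k (d.getD k [] ++ [r2]) := by
            simp [pvIndexStep, hmem, hin]
          have hinv' : ∀ s : String,
              pvOk ((d.insert k (d.getD k [] ++ [r2])).getD s []) ∧
              (d.insert k (d.getD k [] ++ [r2])).get? s ≠ some [] := by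
            intro s
            rcases eq_or_ne s k with rfl | hs
            · rw [PySem.Dict.getD_insert_self, PySem.Dict.get?_insert_self]
              refine ⟨⟨?_, ?_⟩, by simp⟩
              · simp only [List.nodup_append]
                refine ⟨(hinv s).1.1, List.nodup_singleton _, ?_⟩
                intro a ha b hb
                simp only [List.mem_singleton] at hb
                subst hb
                exact fun heq => hin (heq ▸ ha)
              · intro x hx
                rcases List.mem_append.1 hx with hx | hx
                · exact (hinv s).1.2 x hx
                · simp at hx; subst hx; exact hmem
            · rw [PySem.Dict.getD_insert_of_ne _ _ _ hs, PySem.Dict.get?_insert_of_ne _ _ hs]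
              exact hinv s
          rw [hstep]
          have h2 := ih (d.insert k (d.getD k [] ++ [r2])) hinv' t
          rcases eq_or_ne k t with rfl | hne
          · rw [PySem.Dict.getD_insert_self] at h2
            have hcol : pvCollect ((k :: tl, r2) :: rs) k (d.getD k []) =
                pvCollect rs k (d.getD k [] ++ [r2]) := by
              simp only [pvCollect]
              rw [if_pos ⟨by trivial, hmem, hin⟩]
            rw [hcol]
            exact h2
          · rw [PySem.Dict.getD_insert_of_ne _ _ _ hne.symm] at h2
            have hcol : pvCollect ((k :: tl, r2) :: rs) t (d.getD t []) =
                pvCollect rs t (d.getD t []) := by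
              simp only [pvCollect]
              rw [if_neg (by tauto)]
            rw [hcol]
            exact h2
      · have hstep : pvIndexStep d (k :: tl, r2) = d := by
          simp [pvIndexStep, hmem]
        have hcol : pvCollect ((k :: tl, r2) :: rs) t (d.getD t []) =
            pvCollect rs t (d.getD t []) := by
          simp only [pvCollect]
          rw [if_neg (by tauto)]
        rw [hstep, hcol]
        exact ih d hinv t

-- the two outer loops agree, given the invariant on the accumulated dict
lemma pvOuter (results : List (List String × String)) (hres : ∀ r ∈ results, r.1 ≠ []) :
    ∀ (ts : List String) (d : PySem.Dict String String),
    (∀ t, d.get? t = none ∨ (pvCollect results t [] ≠ [] ∧ d.get? t = some (PySem.Str.join ";" (pvCollect results t [])))) →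
    ts.foldl (pvInnerA results) d = ts.foldl (pvStepB (pvIndexB results)) d := by
  have hinv0 : ∀ s : String,
      pvOk ((PySem.Dict.empty : PySem.Dict String (List String)).getD s []) ∧
      (PySem.Dict.empty : PySem.Dict String (List String)).get? s ≠ some [] := by
    intro s
    exact ⟨⟨List.nodup_nil, by simp⟩, by intro h; cases h⟩
  have hidx := pvIndexB_spec results PySem.Dict.empty hinv0
  intro ts
  induction ts with
  | nil => intro d _; rfl
  | cons t ts ih =>
    intro d hinv
    simp only [List.foldl_cons]
    have hidxt := hidx t
    rcases hinv t with hnone | ⟨hne, hsome⟩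
    · have hA : pvInnerA results d t =
          if pvCollect results t [] = [] then d
          else d.insert t (PySem.Str.join ";" (pvCollect results t [])) :=
        pvInnerA_eq results t d [] hres ⟨List.nodup_nil, by simp⟩ (fun _ => hnone)
          (fun h => absurd rfl h)
      have hcontd : d.contains t = false := by
        rw [PySem.Dict.contains_eq_isSome_get?, hnone]; rfl
      by_cases hcol : pvCollect results t [] = []
      · rw [hA, if_pos hcol]
        have hBc : (results.foldl pvIndexStep PySem.Dict.empty).contains t = false := by
          rcases hb : (results.foldl pvIndexStep PySem.Dict.empty).contains t with _ | _
          · rfl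
          · exact absurd hcol (hidxt.2.mp hb)
        have hB : pvStepB (pvIndexB results) d t = d := by
          simp [pvStepB, pvIndexB, hBc]
        rw [hB]
        exact ih d hinv
      · rw [hA, if_neg hcol]
        have hBc : (results.foldl pvIndexStep PySem.Dict.empty).contains t = true :=
          hidxt.2.mpr hcol
        have hB : pvStepB (pvIndexB results) d t =
            d.insert t (PySem.Str.join ";" (pvCollect results t [])) := by
          simp [pvStepB, pvIndexB, hcontd, hBc, hidxt.1]
        rw [hB]
        apply ih
        intro s
        rcases eq_or_ne s t with rfl | hne2
        · exact Or.inr ⟨hcol, by rw [PySem.Dict.get?_insert_self]⟩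
        · rw [PySem.Dict.get?_insert_of_ne _ _ hne2]
          exact hinv s
    · have hA : pvInnerA results d t = d := by
        have h1 := pvInnerA_eq results t d (pvCollect results t []) hres
          (pvCollect_ok results t [] ⟨List.nodup_nil, by simp⟩)
          (fun h => absurd h hne) (fun _ => hsome)
        rw [pvCollect_absorb, if_pos rfl] at h1
        exact h1
      have hcontd : d.contains t = true := by
        rw [PySem.Dict.contains_eq_isSome_get?, hsome]; rfl
      have hB : pvStepB (pvIndexB results) d t = d := by
        simp [pvStepB, hcontd]
      rw [hA, hB]
      exact ih d hinv

-- ===== VERDICT (by name: the statement is the Claim_ definition above) =====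
theorem get_governor_relation_spec : Claim_equal_get_governor_relation := by
  intro tokenized results _ hpre
  unfold Spec_get_governor_relation
  rcases hpre with h | h
  · subst h; rfl
  · unfold get_governor_relation get_governor_relation_alt
    rw [pvOuter results h tokenized PySem.Dict.empty (fun t => Or.inl rfl)]

theorem get_governor_relation_raises : Claim_raises_get_governor_relation := by
  unfold Claim_raises_get_governor_relation
  constructor
  · intro tokenized results _ hr hpre
    rcases hr with ⟨hne, r, hrmem, hrnil⟩
    rcases hpre with h | h
    · exact hne h
    · exact h r hrmem hrnil
  · decide

-- self-check: the stated raise witness really lies inside Raises_ (read off from the theorem above)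
theorem pvRaiseWitness_get_governor_relation_ok :
    Raises_get_governor_relation pvRaiseWitness_get_governor_relation.1 pvRaiseWitness_get_governor_relation.2 :=
  get_governor_relation_raises.2.2.1
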